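-- pv_equiv track=rewrite | github.com/evdoxiataka/simulated_interventions_study_analysis | utils/information_retrieval.py | _opts_per_task_T2
-- ===== SOURCE A (Python) =====
-- def _opts_per_task_T2(t_options, t_ids):
--     """
--         t_options: task options as retrieved by database (List of tuples)
--     """
--     opts_per_task={}
--     corr_per_task = {}
--     for i,row in enumerate(t_options):
--         if row[0] in t_ids:
--             if row[0] not in opts_per_task:
--                 opts_per_task[row[0]] = []
--             if row[0] not in corr_per_task:
--                 corr_per_task[row[0]] = []
--             if 'None' not in row[1] and 'Causal' not in row[1]:
--                 opts_per_task[row[0]].append(row[1])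
--                 if row[2]:
--                     corr_per_task[row[0]].append(row[1])
--     return opts_per_task, corr_per_task
-- ===== SOURCE B (Python) =====
-- def _opts_per_task_T2(t_options, t_ids):
--     ids = set(t_ids)
--     # distinct matching task ids, in first-occurrence order
--     keys = []
--     seen = set()
--     for row in t_options:
--         if row[0] in ids and row[0] not in seen:
--             seen.add(row[0])
--             keys.append(row[0])
--     def ok(text):
--         return 'None' not in text and 'Causal' not in text
--     opts_per_task = {k: [r[1] for r in t_options if r[0] == k and ok(r[1])]
--                      for k in keys}
--     corr_per_task = {k: [r[1] for r in t_options if r[0] == k and ok(r[1]) and r[2]]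
--                      for k in keys}
--     return opts_per_task, corr_per_task
-- ===== Notes on version B (the rewrite author's own statement) =====
-- stated objective: faster
-- what changed: Replaces the single interleaved dict-building loop with a three-phase plan: collect the distinct matching task ids in first-occurrence order (membership in t_ids via a set instead of A's per-row list scan), then build each result dict by a per-key filtered comprehension over t_options.
import Mathlib
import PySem

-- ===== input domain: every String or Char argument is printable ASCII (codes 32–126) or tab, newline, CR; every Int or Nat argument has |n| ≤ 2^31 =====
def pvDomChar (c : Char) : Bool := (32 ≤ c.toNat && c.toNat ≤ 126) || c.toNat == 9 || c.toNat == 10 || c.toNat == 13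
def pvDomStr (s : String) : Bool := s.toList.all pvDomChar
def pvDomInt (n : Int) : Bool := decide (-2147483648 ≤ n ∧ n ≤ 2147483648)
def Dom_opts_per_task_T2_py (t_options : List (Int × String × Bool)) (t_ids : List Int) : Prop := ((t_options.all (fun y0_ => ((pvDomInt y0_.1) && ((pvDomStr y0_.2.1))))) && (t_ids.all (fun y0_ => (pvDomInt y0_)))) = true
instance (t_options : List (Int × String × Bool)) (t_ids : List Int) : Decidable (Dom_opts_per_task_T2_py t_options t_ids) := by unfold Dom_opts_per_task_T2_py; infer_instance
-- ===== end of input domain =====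

-- B replaces A's single interleaved dict-building loop by three phases (collect the distinct matching ids in first-occurrence order, then one filtered per-key pass for each result dict); alternative decomposition, same results.

-- ===== PORT A =====
-- the loop body of A, step for step (the i of enumerate is unused by A)
def pvStepA (t_ids : List Int)
    (st : PySem.Dict Int (List String) × PySem.Dict Int (List String))
    (row : Int × String × Bool) :
    PySem.Dict Int (List String) × PySem.Dict Int (List String) :=
  if t_ids.contains row.1 then
    let o := if st.1.contains row.1 then st.1 else st.1.insert row.1 []
    let c := if st.2.contains row.1 then st.2 else st.2.insert row.1 []
    if !(PySem.Str.isIn "None" row.2.1) && !(PySem.Str.isIn "Causal" row.2.1) then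
      (o.modify row.1 [] (fun v => v ++ [row.2.1]),
       if row.2.2 then c.modify row.1 [] (fun v => v ++ [row.2.1]) else c)
    else (o, c)
  else st


def opts_per_task_T2_py (t_options : List (Int × String × Bool)) (t_ids : List Int) : (List (Int × List String)) × (List (Int × List String)) :=
  let res := t_options.foldl (pvStepA t_ids) (PySem.Dict.empty, PySem.Dict.empty)
  (res.1.items, res.2.items)

-- ===== PORT B =====
-- B's helper ok(text)
def pvOk (s : String) : Bool := !(PySem.Str.isIn "None" s) && !(PySem.Str.isIn "Causal" s)

def opts_per_task_T2_py_alt (t_options : List (Int × String × Bool)) (t_ids : List Int) : (List (Int × List String)) × (List (Int × List String)) :=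
  let ids : PySem.Set Int := PySem.Set.ofList t_ids
  let keys : PySem.Set Int :=
    t_options.foldl (fun s row =>
      if PySem.Set.contains ids row.1 then PySem.Set.add s row.1 else s) PySem.Set.empty
  (keys.map (fun k => (k, (t_options.filter (fun r => r.1 == k && pvOk r.2.1)).map (fun r => r.2.1))),
   keys.map (fun k => (k, (t_options.filter (fun r => r.1 == k && pvOk r.2.1 && r.2.2)).map (fun r => r.2.1))))

-- ===== PRECONDITION & SPEC =====
def Spec_opts_per_task_T2_py (t_options : List (Int × String × Bool)) (t_ids : List Int) (out : (List (Int × List String)) × (List (Int × List String))) : Prop := out = opts_per_task_T2_py_alt t_options t_ids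
instance (t_options : List (Int × String × Bool)) (t_ids : List Int) (out : (List (Int × List String)) × (List (Int × List String))) : Decidable (Spec_opts_per_task_T2_py t_options t_ids out) := by unfold Spec_opts_per_task_T2_py; infer_instance

-- ===== CLAIM (what is proved, stated in full; the proofs are below) =====
def Claim_equal_opts_per_task_T2_py : Prop := ∀ (t_options : List (Int × String × Bool)) (t_ids : List Int), Dom_opts_per_task_T2_py t_options t_ids → Spec_opts_per_task_T2_py t_options t_ids (opts_per_task_T2_py t_options t_ids)

-- ===== LEMMAS AND PROOFS =====

-- the conditional empty-insert of A's loop leaves every getD-with-[] lookup unchanged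
lemma pvGetD_condInsert (d : PySem.Dict Int (List String)) (a k : Int) :
    (if d.contains a then d else d.insert a []).getD k [] = d.getD k [] := by
  by_cases h : d.contains a
  · rw [if_pos h]
  · rw [if_neg h, PySem.Dict.getD_insert]
    split_ifs with hk
    · subst hk; rw [PySem.Dict.getD_of_not_contains _ _ (by simpa using h)]
    · rfl

lemma pvStep1_getD (t_ids : List Int) (r : Int × String × Bool)
    (d1 d2 : PySem.Dict Int (List String)) (k : Int) :
    (pvStepA t_ids (d1, d2) r).1.getD k [] =
      d1.getD k [] ++ (if (r.1 == k && t_ids.contains r.1 && pvOk r.2.1) then [r.2.1] else []) := by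
  unfold pvStepA
  by_cases hid : t_ids.contains r.1 = true
  · rw [if_pos hid]
    dsimp only
    by_cases hok : (!(PySem.Str.isIn "None" r.2.1) && !(PySem.Str.isIn "Causal" r.2.1)) = true
    · rw [if_pos hok]
      have hok' : pvOk r.2.1 = true := hok
      dsimp only
      rw [PySem.Dict.getD_modify]
      by_cases hk : k = r.1
      · subst hk
        rw [if_pos rfl, pvGetD_condInsert]
        rw [show (r.1 == r.1 && t_ids.contains r.1 && pvOk r.2.1) = true by
          rw [hid, hok', beq_self_eq_true]; rfl]
        rw [if_pos rfl]
      · rw [if_neg hk, pvGetD_condInsert]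
        rw [show (r.1 == k && t_ids.contains r.1 && pvOk r.2.1) = false by
          rw [show (r.1 == k) = false by simpa using fun h => hk h.symm]; rfl]
        rw [if_neg (by simp), List.append_nil]
    · rw [if_neg hok]
      have hok' : pvOk r.2.1 = false := by rwa [Bool.not_eq_true] at hok
      dsimp only
      rw [pvGetD_condInsert]
      rw [show (r.1 == k && t_ids.contains r.1 && pvOk r.2.1) = false by
        rw [hok', Bool.and_false]]
      rw [if_neg (by simp), List.append_nil]
  · rw [if_neg hid]
    have hid' : t_ids.contains r.1 = false := by rwa [Bool.not_eq_true] at hid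
    rw [show (r.1 == k && t_ids.contains r.1 && pvOk r.2.1) = false by
      rw [hid', Bool.and_false, Bool.false_and]]
    rw [if_neg (by simp), List.append_nil]

lemma pvStep2_getD (t_ids : List Int) (r : Int × String × Bool)
    (d1 d2 : PySem.Dict Int (List String)) (k : Int) :
    (pvStepA t_ids (d1, d2) r).2.getD k [] =
      d2.getD k [] ++ (if (r.1 == k && t_ids.contains r.1 && pvOk r.2.1 && r.2.2) then [r.2.1] else []) := by
  unfold pvStepA
  by_cases hid : t_ids.contains r.1 = true
  · rw [if_pos hid]
    dsimp only
    by_cases hok : (!(PySem.Str.isIn "None" r.2.1) && !(PySem.Str.isIn "Causal" r.2.1)) = true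
    · rw [if_pos hok]
      have hok' : pvOk r.2.1 = true := hok
      dsimp only
      by_cases hco : r.2.2 = true
      · rw [if_pos hco, PySem.Dict.getD_modify]
        by_cases hk : k = r.1
        · subst hk
          rw [if_pos rfl, pvGetD_condInsert]
          rw [show (r.1 == r.1 && t_ids.contains r.1 && pvOk r.2.1 && r.2.2) = true by
            rw [hid, hok', hco, beq_self_eq_true]; rfl]
          rw [if_pos rfl]
        · rw [if_neg hk, pvGetD_condInsert]
          rw [show (r.1 == k && t_ids.contains r.1 && pvOk r.2.1 && r.2.2) = false by
            rw [show (r.1 == k) = false by simpa using fun h => hk h.symm]; rfl]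
          rw [if_neg (by simp), List.append_nil]
      · have hco' : r.2.2 = false := by rwa [Bool.not_eq_true] at hco
        rw [if_neg hco, pvGetD_condInsert]
        rw [show (r.1 == k && t_ids.contains r.1 && pvOk r.2.1 && r.2.2) = false by
          rw [hco', Bool.and_false]]
        rw [if_neg (by simp), List.append_nil]
    · rw [if_neg hok]
      have hok' : pvOk r.2.1 = false := by rwa [Bool.not_eq_true] at hok
      dsimp only
      rw [pvGetD_condInsert]
      rw [show (r.1 == k && t_ids.contains r.1 && pvOk r.2.1 && r.2.2) = false by
        rw [hok', Bool.and_false, Bool.false_and]]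
      rw [if_neg (by simp), List.append_nil]
  · rw [if_neg hid]
    have hid' : t_ids.contains r.1 = false := by rwa [Bool.not_eq_true] at hid
    rw [show (r.1 == k && t_ids.contains r.1 && pvOk r.2.1 && r.2.2) = false by
      rw [hid', Bool.and_false, Bool.false_and, Bool.false_and]]
    rw [if_neg (by simp), List.append_nil]

lemma pvCond_contains (d : PySem.Dict Int (List String)) (a : Int) :
    (if d.contains a then d else d.insert a []).contains a = true := by
  by_cases h : d.contains a
  · rwa [if_pos h]
  · rw [if_neg h]; exact PySem.Dict.contains_insert_self _ _ _

lemma pvKeys_condInsert (d : PySem.Dict Int (List String)) (a : Int) :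
    (if d.contains a then d else d.insert a []).keys = PySem.Set.add d.keys a := by
  by_cases h : d.contains a
  · rw [if_pos h]
    have hm : a ∈ d.keys := (PySem.Dict.contains_iff_mem_keys d a).mp h
    simp [PySem.Set.add, PySem.Set.contains_eq_listContains, hm]
  · rw [if_neg h, PySem.Dict.keys_insert_of_not_contains _ _ (by rwa [Bool.not_eq_true] at h)]
    have hm : a ∉ d.keys := fun hm => h ((PySem.Dict.contains_iff_mem_keys d a).mpr hm)
    simp [PySem.Set.add, PySem.Set.contains_eq_listContains, hm]

lemma pvNodup_condInsert (d : PySem.Dict Int (List String)) (a : Int)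
    (h : d.keys.Nodup) : (if d.contains a then d else d.insert a []).keys.Nodup := by
  by_cases hc : d.contains a
  · rwa [if_pos hc]
  · rw [if_neg hc]; exact PySem.Dict.nodup_keys_insert _ _ _ h

lemma pvKeys_modify_of_contains (d : PySem.Dict Int (List String)) (k : Int)
    (d0 : List String) (f : List String → List String) (h : d.contains k = true) :
    (d.modify k d0 f).keys = d.keys := by
  rw [PySem.Dict.keys_modify, PySem.Dict.keys_insert_of_contains _ _ h]

lemma pvStep_keys (t_ids : List Int) (r : Int × String × Bool)
    (d1 d2 : PySem.Dict Int (List String)) :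
    (pvStepA t_ids (d1, d2) r).1.keys =
      (if t_ids.contains r.1 then PySem.Set.add d1.keys r.1 else d1.keys) ∧
    (pvStepA t_ids (d1, d2) r).2.keys =
      (if t_ids.contains r.1 then PySem.Set.add d2.keys r.1 else d2.keys) := by
  unfold pvStepA
  by_cases hid : t_ids.contains r.1 = true
  · rw [if_pos hid, if_pos hid, if_pos hid]
    dsimp only
    by_cases hok : (!(PySem.Str.isIn "None" r.2.1) && !(PySem.Str.isIn "Causal" r.2.1)) = true
    · rw [if_pos hok]
      constructor
      · rw [pvKeys_modify_of_contains _ _ _ _ (pvCond_contains d1 r.1), pvKeys_condInsert]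
      · by_cases hco : r.2.2 = true
        · rw [if_pos hco, pvKeys_modify_of_contains _ _ _ _ (pvCond_contains d2 r.1), pvKeys_condInsert]
        · rw [if_neg hco, pvKeys_condInsert]
    · rw [if_neg hok]
      exact ⟨pvKeys_condInsert d1 r.1, pvKeys_condInsert d2 r.1⟩
  · rw [if_neg hid, if_neg hid, if_neg hid]
    exact ⟨rfl, rfl⟩

lemma pvStep_nodup (t_ids : List Int) (r : Int × String × Bool)
    (d1 d2 : PySem.Dict Int (List String)) (h1 : d1.keys.Nodup) (h2 : d2.keys.Nodup) :
    (pvStepA t_ids (d1, d2) r).1.keys.Nodup ∧ (pvStepA t_ids (d1, d2) r).2.keys.Nodup := by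
  unfold pvStepA
  by_cases hid : t_ids.contains r.1 = true
  · rw [if_pos hid]
    dsimp only
    by_cases hok : (!(PySem.Str.isIn "None" r.2.1) && !(PySem.Str.isIn "Causal" r.2.1)) = true
    · rw [if_pos hok]
      constructor
      · rw [pvKeys_modify_of_contains _ _ _ _ (pvCond_contains d1 r.1)]
        exact pvNodup_condInsert _ _ h1
      · by_cases hco : r.2.2 = true
        · rw [if_pos hco, pvKeys_modify_of_contains _ _ _ _ (pvCond_contains d2 r.1)]
          exact pvNodup_condInsert _ _ h2
        · rw [if_neg hco]
          exact pvNodup_condInsert _ _ h2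
    · rw [if_neg hok]
      exact ⟨pvNodup_condInsert _ _ h1, pvNodup_condInsert _ _ h2⟩
  · rw [if_neg hid]
    exact ⟨h1, h2⟩

lemma pvGetD_fold1 (t_ids : List Int) (l : List (Int × String × Bool))
    (d1 d2 : PySem.Dict Int (List String)) (k : Int) :
    (l.foldl (pvStepA t_ids) (d1, d2)).1.getD k [] =
      d1.getD k [] ++
        ((l.filter (fun r => r.1 == k && t_ids.contains r.1 && pvOk r.2.1)).map (fun r => r.2.1)) := by
  induction l generalizing d1 d2 with
  | nil => simp
  | cons r l ih =>
    rw [List.foldl_cons, List.filter_cons]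
    rcases hE : (pvStepA t_ids (d1, d2) r) with ⟨e1, e2⟩
    rw [ih e1 e2]
    have he : e1.getD k [] = (pvStepA t_ids (d1, d2) r).1.getD k [] := by rw [hE]
    rw [he, pvStep1_getD]
    by_cases hc : (r.1 == k && t_ids.contains r.1 && pvOk r.2.1) = true
    · rw [if_pos hc, if_pos hc, List.map_cons, List.append_assoc]; rfl
    · have hc' := Bool.not_eq_true _ |>.mp hc
      rw [if_neg (by rw [hc']; exact Bool.false_ne_true), if_neg (by rw [hc']; exact Bool.false_ne_true), List.append_nil]

lemma pvGetD_fold2 (t_ids : List Int) (l : List (Int × String × Bool))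
    (d1 d2 : PySem.Dict Int (List String)) (k : Int) :
    (l.foldl (pvStepA t_ids) (d1, d2)).2.getD k [] =
      d2.getD k [] ++
        ((l.filter (fun r => r.1 == k && t_ids.contains r.1 && pvOk r.2.1 && r.2.2)).map (fun r => r.2.1)) := by
  induction l generalizing d1 d2 with
  | nil => simp
  | cons r l ih =>
    rw [List.foldl_cons, List.filter_cons]
    rcases hE : (pvStepA t_ids (d1, d2) r) with ⟨e1, e2⟩
    rw [ih e1 e2]
    have he : e2.getD k [] = (pvStepA t_ids (d1, d2) r).2.getD k [] := by rw [hE]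
    rw [he, pvStep2_getD]
    by_cases hc : (r.1 == k && t_ids.contains r.1 && pvOk r.2.1 && r.2.2) = true
    · rw [if_pos hc, if_pos hc, List.map_cons, List.append_assoc]; rfl
    · have hc' := Bool.not_eq_true _ |>.mp hc
      rw [if_neg (by rw [hc']; exact Bool.false_ne_true), if_neg (by rw [hc']; exact Bool.false_ne_true), List.append_nil]

lemma pvKeys_fold (t_ids : List Int) (l : List (Int × String × Bool))
    (d1 d2 : PySem.Dict Int (List String)) :
    (l.foldl (pvStepA t_ids) (d1, d2)).1.keys =
      l.foldl (fun s row => if t_ids.contains row.1 then PySem.Set.add s row.1 else s) d1.keys ∧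
    (l.foldl (pvStepA t_ids) (d1, d2)).2.keys =
      l.foldl (fun s row => if t_ids.contains row.1 then PySem.Set.add s row.1 else s) d2.keys := by
  induction l generalizing d1 d2 with
  | nil => exact ⟨rfl, rfl⟩
  | cons r l ih =>
    rw [List.foldl_cons, List.foldl_cons, List.foldl_cons]
    rcases hE : (pvStepA t_ids (d1, d2) r) with ⟨e1, e2⟩
    obtain ⟨ih1, ih2⟩ := ih e1 e2
    obtain ⟨h1, h2⟩ := pvStep_keys t_ids r d1 d2
    rw [hE] at h1 h2
    exact ⟨by rw [ih1, h1], by rw [ih2, h2]⟩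

lemma pvNodup_fold (t_ids : List Int) (l : List (Int × String × Bool))
    (d1 d2 : PySem.Dict Int (List String)) (h1 : d1.keys.Nodup) (h2 : d2.keys.Nodup) :
    (l.foldl (pvStepA t_ids) (d1, d2)).1.keys.Nodup ∧
    (l.foldl (pvStepA t_ids) (d1, d2)).2.keys.Nodup := by
  induction l generalizing d1 d2 with
  | nil => exact ⟨h1, h2⟩
  | cons r l ih =>
    rw [List.foldl_cons]
    rcases hE : (pvStepA t_ids (d1, d2) r) with ⟨e1, e2⟩
    obtain ⟨g1, g2⟩ := pvStep_nodup t_ids r d1 d2 h1 h2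
    rw [hE] at g1 g2
    exact ih e1 e2 g1 g2

lemma pvContains_ofList (t_ids : List Int) (x : Int) :
    PySem.Set.contains (PySem.Set.ofList t_ids) x = t_ids.contains x := by
  rw [Bool.eq_iff_iff]
  simp [PySem.Set.contains_eq_listContains, PySem.Set.mem_ofList]

lemma pvMem_keysFold (t_ids : List Int) (l : List (Int × String × Bool))
    (s : PySem.Set Int) (k : Int)
    (hk : k ∈ l.foldl (fun s row => if t_ids.contains row.1 then PySem.Set.add s row.1 else s) s)
    (hs : ∀ x ∈ s, t_ids.contains x = true) : t_ids.contains k = true := by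
  induction l generalizing s with
  | nil => exact hs k hk
  | cons r l ih =>
    rw [List.foldl_cons] at hk
    apply ih _ hk
    intro x hx
    by_cases hid : t_ids.contains r.1
    · rw [if_pos hid] at hx
      rcases (PySem.Set.mem_add s r.1 x).mp hx with h | h
      · exact hs x h
      · subst h; exact hid
    · rw [if_neg hid] at hx; exact hs x hx

lemma pvFilter_eq (t_ids : List Int) (l : List (Int × String × Bool)) (k : Int)
    (hk : t_ids.contains k = true) :
    l.filter (fun r => r.1 == k && t_ids.contains r.1 && pvOk r.2.1) =
      l.filter (fun r => r.1 == k && pvOk r.2.1) := by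
  apply List.filter_congr
  intro r _
  by_cases h : r.1 = k
  · subst h
    have hm : r.1 ∈ t_ids := by simpa using hk
    simp [hm]
  · simp [show (r.1 == k) = false by simpa using h]

lemma pvFilter_eq2 (t_ids : List Int) (l : List (Int × String × Bool)) (k : Int)
    (hk : t_ids.contains k = true) :
    l.filter (fun r => r.1 == k && t_ids.contains r.1 && pvOk r.2.1 && r.2.2) =
      l.filter (fun r => r.1 == k && pvOk r.2.1 && r.2.2) := by
  apply List.filter_congr
  intro r _
  by_cases h : r.1 = k
  · subst h
    have hm : r.1 ∈ t_ids := by simpa using hk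
    simp [hm]
  · simp [show (r.1 == k) = false by simpa using h]


-- the whole equivalence, unconditionally
theorem pvMain (t_options : List (Int × String × Bool)) (t_ids : List Int) :
    opts_per_task_T2_py t_options t_ids = opts_per_task_T2_py_alt t_options t_ids := by
  unfold opts_per_task_T2_py opts_per_task_T2_py_alt
  dsimp only
  simp only [pvContains_ofList]
  obtain ⟨hk1, hk2⟩ := pvKeys_fold t_ids t_options PySem.Dict.empty PySem.Dict.empty
  obtain ⟨hn1, hn2⟩ := pvNodup_fold t_ids t_options PySem.Dict.empty PySem.Dict.empty
    PySem.Dict.nodup_keys_empty PySem.Dict.nodup_keys_empty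
  rw [PySem.Dict.keys_empty] at hk1 hk2
  have hkeysmem : ∀ k ∈ t_options.foldl
      (fun s row => if t_ids.contains row.1 then PySem.Set.add s row.1 else s)
      ([] : PySem.Set Int), t_ids.contains k = true := by
    intro k hk
    exact pvMem_keysFold t_ids t_options _ k hk (by intro x hx; cases hx)
  refine Prod.ext ?_ ?_
  · show (t_options.foldl (pvStepA t_ids) (PySem.Dict.empty, PySem.Dict.empty)).1.items = _
    rw [PySem.Dict.items_eq_map_keys _ hn1 [], hk1]
    apply List.map_congr_left
    intro k hk
    have hid := hkeysmem k hk
    rw [pvGetD_fold1 t_ids t_options PySem.Dict.empty PySem.Dict.empty k,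
      PySem.Dict.getD_empty, List.nil_append, pvFilter_eq t_ids t_options k hid]
  · show (t_options.foldl (pvStepA t_ids) (PySem.Dict.empty, PySem.Dict.empty)).2.items = _
    rw [PySem.Dict.items_eq_map_keys _ hn2 [], hk2]
    apply List.map_congr_left
    intro k hk
    have hid := hkeysmem k hk
    rw [pvGetD_fold2 t_ids t_options PySem.Dict.empty PySem.Dict.empty k,
      PySem.Dict.getD_empty, List.nil_append, pvFilter_eq2 t_ids t_options k hid]

-- ===== VERDICT (by name: the statement is the Claim_ definition above) =====
theorem opts_per_task_T2_py_spec : Claim_equal_opts_per_task_T2_py := by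
  intro t_options t_ids _
  unfold Spec_opts_per_task_T2_py
  exact pvMain t_options t_ids
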